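-- pv_equiv track=rewrite | github.com/Koppenbrink/Firewallhausmeister | Firewallhausmeister/functions.py | extract_exe_name
-- ===== SOURCE A (Python) =====
-- def extract_exe_name(file_path:str) -> str:
--     '''
--     extracts the name of an exe from a file path
--     :param file_path: the file path from which the name should be extracted
--     :return: the name of the exe
--     '''
--     i = 1
--     exeName = ''
--     while i <= len(file_path):
--         if file_path[-i] == '\\':
--             break
--         if i > 4:
--             exeName = file_path[-i] + exeName
--         i += 1
--     return exeName
-- ===== SOURCE B (Python) =====
-- def extract_exe_name(file_path: str) -> str:
--     '''
--     extracts the name of an exe from a file path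
--     :param file_path: the file path from which the name should be extracted
--     :return: the name of the exe
--     '''
--     idx = file_path.rfind('\\')
--     return file_path[idx + 1:-4]
-- ===== Notes on version B (the rewrite author's own statement) =====
-- stated objective: simpler
-- what changed: Replaces the backwards character-by-character while loop that accumulates the name by repeated string prepending with a single rfind locating the last backslash followed by one slice from that position to four characters before the end.
import Mathlib
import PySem

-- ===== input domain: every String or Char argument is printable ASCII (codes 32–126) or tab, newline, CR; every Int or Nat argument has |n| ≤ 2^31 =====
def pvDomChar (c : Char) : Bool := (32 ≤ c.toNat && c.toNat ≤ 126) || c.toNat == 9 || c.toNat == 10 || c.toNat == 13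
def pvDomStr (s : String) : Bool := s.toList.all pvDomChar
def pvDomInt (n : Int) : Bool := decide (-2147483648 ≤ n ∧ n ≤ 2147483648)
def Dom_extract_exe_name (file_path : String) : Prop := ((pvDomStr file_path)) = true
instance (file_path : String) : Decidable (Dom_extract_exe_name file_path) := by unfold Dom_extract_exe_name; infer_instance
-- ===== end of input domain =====

-- B replaces A's backwards character-by-character while loop (accumulating a string) with a single rfind plus one slice; objective: simpler.

-- ===== PORT A =====
-- A's while loop: i counts 1..len from the end of the string; break on a
-- backslash; characters past the 4-character extension are prepended to the
-- accumulator.  The `none` branch of pyGet? is unreachable (the guard gives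
-- 1 <= i <= len, so the negative index is always in range), so A never raises.
def extractExeLoop (l : List Char) (i : Nat) (acc : List Char) : List Char :=
  if h : 1 ≤ i ∧ i ≤ l.length then
    match PySem.List.pyGet? l (-(i : Int)) with
    | none => acc
    | some c =>
      if c = '\\' then acc
      else extractExeLoop l (i + 1) (if 4 < i then c :: acc else acc)
  else acc
  termination_by l.length + 1 - i
  decreasing_by omega

def extract_exe_name (file_path : String) : String :=
  String.ofList (extractExeLoop file_path.toList 1 [])

-- ===== PORT B =====
def extract_exe_name_alt (file_path : String) : String :=
  let idx := PySem.Str.rfind file_path "\\"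
  PySem.Str.slice file_path (some (idx + 1)) (some (-4))

-- ===== PRECONDITION & SPEC =====
def Spec_extract_exe_name (file_path : String) (out : String) : Prop := out = extract_exe_name_alt file_path
instance (file_path : String) (out : String) : Decidable (Spec_extract_exe_name file_path out) := by unfold Spec_extract_exe_name; infer_instance

-- ===== CLAIM (what is proved, stated in full; the proofs are below) =====
def Claim_equal_extract_exe_name : Prop := ∀ (file_path : String), Dom_extract_exe_name file_path → Spec_extract_exe_name file_path (extract_exe_name file_path)

-- ===== LEMMAS AND PROOFS =====

-- the loop's break predicate, as a takeWhile predicate on the reversed character list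
def pvKeep (c : Char) : Bool := c != '\\'

lemma pv_pyGet_neg (l : List Char) (i : Nat) (h1 : 1 ≤ i) (h2 : i ≤ l.length) :
    PySem.List.pyGet? l (-(i : Int)) = some (l.reverse[i - 1]'(by simp; omega)) := by
  simp only [PySem.List.pyGet?, PySem.List.pyIdx?, List.getElem_reverse]
  rw [if_neg (by omega), if_pos (by omega), Option.bind_some, List.getElem?_eq_getElem (by omega)]
  congr 2
  omega

lemma pv_loop_eq (l : List Char) (fuel : Nat) : ∀ (i : Nat) (acc : List Char),
    1 ≤ i → l.length + 1 - i ≤ fuel →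
    extractExeLoop l i acc
      = (((l.reverse.drop (i - 1)).takeWhile pvKeep).drop (5 - i)).reverse ++ acc := by
  induction fuel with
  | zero =>
    intro i acc h1 hf
    have hnil : l.reverse.drop (i-1) = ([] : List Char) :=
      List.drop_of_length_le (by simp only [List.length_reverse]; omega)
    rw [extractExeLoop, dif_neg (by omega), hnil]
    simp
  | succ f ih =>
    intro i acc h1 hf
    by_cases hle : i ≤ l.length
    · have hidx : i - 1 < l.reverse.length := by simp only [List.length_reverse]; omega
      have hi1 : i - 1 + 1 = i := by omega
      have hdrop : l.reverse.drop (i - 1) = l.reverse[i-1] :: l.reverse.drop i := by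
        rw [List.drop_eq_getElem_cons hidx, hi1]
      rw [extractExeLoop, dif_pos ⟨h1, hle⟩, pv_pyGet_neg l i h1 hle]
      simp only []
      by_cases hbs : l.reverse[i-1]'hidx = '\\'
      · have hknot : ¬ (pvKeep (l.reverse[i-1]'hidx) = true) := by
          simp only [pvKeep, bne_iff_ne, ne_eq, not_not]; exact hbs
        rw [if_pos hbs, hdrop, List.takeWhile_cons, if_neg hknot]
        simp
      · have hkeep : pvKeep (l.reverse[i-1]'hidx) = true := by
          simp only [pvKeep, bne_iff_ne, ne_eq]; exact hbs
        rw [if_neg hbs]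
        by_cases h4 : 4 < i
        · rw [if_pos h4, ih (i+1) _ (by omega) (by omega), hdrop, List.takeWhile_cons,
            if_pos hkeep]
          have h5 : (5 - i) = 0 := by omega
          have h5' : (5 - (i+1)) = 0 := by omega
          simp [h5, h5']
        · rw [if_neg h4, ih (i+1) _ (by omega) (by omega), hdrop, List.takeWhile_cons,
            if_pos hkeep]
          have h5 : (5 - i) = (5 - (i+1)) + 1 := by omega
          rw [h5, List.drop_succ_cons]
          norm_num
    · rw [extractExeLoop, dif_neg (by omega)]
      rw [List.drop_of_length_le (l := l.reverse) (by simp only [List.length_reverse]; omega)]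
      simp

lemma pv_tw_lt {α : Type} (p : α → Bool) (l : List α) (j : Nat)
    (hj : j < (l.takeWhile p).length) :
    p (l[j]'(lt_of_lt_of_le hj (by simpa using (List.takeWhile_sublist p).length_le))) = true := by
  induction l generalizing j with
  | nil => simp at hj
  | cons a t ih =>
    rw [List.takeWhile_cons] at hj
    by_cases hp : p a
    · simp [hp] at hj
      cases j with
      | zero => simpa using hp
      | succ j' => simpa using ih j' (by omega)
    · simp [hp] at hj

lemma pv_tw_at {α : Type} (p : α → Bool) (l : List α)
    (h : (l.takeWhile p).length < l.length) :
    p (l[(l.takeWhile p).length]) = false := by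
  induction l with
  | nil => simp at h
  | cons a t ih =>
    by_cases hp : p a
    · simp [hp] at h ⊢
      exact ih (by omega)
    · simp [hp] at h ⊢

-- forward-index consequences: l[j] ≠ '\' inside the takeWhile region of the reverse
lemma pv_no_bs (l : List Char) (j : Nat) (hj : j < l.length)
    (hk : l.length - 1 - j < (l.reverse.takeWhile pvKeep).length) :
    l[j] ≠ '\\' := by
  have h := pv_tw_lt pvKeep l.reverse (l.length - 1 - j)
    (by simpa using hk)
  rw [List.getElem_reverse] at h
  have hidx : l.length - 1 - (l.length - 1 - j) = j := by omega
  simp only [hidx] at h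
  simp only [pvKeep, bne_iff_ne, ne_eq] at h
  exact h

lemma pv_at_bs (l : List Char) (hk : (l.reverse.takeWhile pvKeep).length < l.length) :
    l[l.length - 1 - (l.reverse.takeWhile pvKeep).length]'(by omega) = '\\' := by
  have h := pv_tw_at pvKeep l.reverse (by simpa using hk)
  rw [List.getElem_reverse] at h
  simp only [pvKeep, bne_eq_false_iff_eq] at h
  simpa using h

lemma pv_prefix_iff (l : List Char) (j : Nat) (hj : j < l.length) :
    (['\\'].isPrefixOf (l.drop j)) = (l[j] == '\\') := by
  rw [List.drop_eq_getElem_cons hj]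
  simp [List.isPrefixOf, eq_comm]

lemma pv_go_zero (s sub : List Char) :
    PySem.Chars.rfind.go s sub 0 = if sub.isPrefixOf s then 0 else -1 := rfl

lemma pv_go_succ (s sub : List Char) (j : Nat) :
    PySem.Chars.rfind.go s sub (j+1)
      = if sub.isPrefixOf (s.drop (j+1)) then ((j+1 : Nat) : Int) else PySem.Chars.rfind.go s sub j := rfl

lemma pv_go_no (l : List Char) (hk : (l.reverse.takeWhile pvKeep).length = l.length) :
    ∀ j, j ≤ l.length → PySem.Chars.rfind.go l ['\\'] j = -1 := by
  intro j
  induction j with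
  | zero =>
    intro _
    rw [pv_go_zero]
    by_cases h0 : 0 < l.length
    · have hp := pv_prefix_iff l 0 h0
      rw [List.drop_zero] at hp
      rw [hp]
      simp only [beq_iff_eq]
      rw [if_neg (pv_no_bs l 0 h0 (by omega))]
    · have : l = [] := List.eq_nil_of_length_eq_zero (by omega)
      subst this
      simp [List.isPrefixOf]
  | succ j ihj =>
    intro hj
    rw [pv_go_succ]
    by_cases hlt : j + 1 < l.length
    · rw [pv_prefix_iff _ (j+1) hlt]
      simp only [beq_iff_eq]
      rw [if_neg (pv_no_bs l (j+1) hlt (by omega))]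
      exact ihj (by omega)
    · rw [List.drop_of_length_le (by omega)]
      simp only [List.isPrefixOf]
      rw [if_neg (by simp)]
      exact ihj (by omega)

lemma pv_go_yes (l : List Char) (hk : (l.reverse.takeWhile pvKeep).length < l.length) :
    ∀ d, (l.length - 1 - (l.reverse.takeWhile pvKeep).length) + d ≤ l.length →
      PySem.Chars.rfind.go l ['\\'] ((l.length - 1 - (l.reverse.takeWhile pvKeep).length) + d)
        = ((l.length - 1 - (l.reverse.takeWhile pvKeep).length : Nat) : Int) := by
  intro d
  induction d with
  | zero =>
    intro _
    have hm : l.length - 1 - (l.reverse.takeWhile pvKeep).length < l.length := by omega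
    obtain ⟨m, hcase⟩ : ∃ m, l.length - 1 - (l.reverse.takeWhile pvKeep).length = m := ⟨_, rfl⟩
    have hbs : l[m]'(by omega) = '\\' := by
      subst hcase
      exact pv_at_bs l hk
    rw [Nat.add_zero, hcase]
    cases m with
    | zero =>
      rw [pv_go_zero]
      have hp := pv_prefix_iff l 0 (by omega)
      rw [List.drop_zero] at hp
      rw [hp]
      simp [hbs]
    | succ m' =>
      rw [pv_go_succ, pv_prefix_iff _ (m'+1) (by omega)]
      simp [hbs]
  | succ d ihd =>
    intro hd
    have harith : (l.length - 1 - (l.reverse.takeWhile pvKeep).length) + (d + 1)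
        = ((l.length - 1 - (l.reverse.takeWhile pvKeep).length) + d) + 1 := by omega
    rw [harith, pv_go_succ]
    by_cases hlt : ((l.length - 1 - (l.reverse.takeWhile pvKeep).length) + d) + 1 < l.length
    · rw [pv_prefix_iff _ _ hlt]
      simp only [beq_iff_eq]
      rw [if_neg (pv_no_bs l _ hlt (by omega))]
      exact ihd (by omega)
    · rw [List.drop_of_length_le (by omega)]
      simp only [List.isPrefixOf]
      rw [if_neg (by simp)]
      exact ihd (by omega)

lemma pv_clamp_neg4 (n : Nat) : PySem.List.clampIdx n (-4) = n - 4 := by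
  simp only [PySem.List.clampIdx]
  split_ifs with h1 h2 <;> omega

lemma pv_clamp_nonneg (n m : Nat) (h : m ≤ n) : PySem.List.clampIdx n ((m : Int)) = m := by
  simp only [PySem.List.clampIdx]
  split_ifs with h1 <;> omega

lemma pv_slice_eq (l : List Char) (a : Int) :
    PySem.List.slice l (some a) (some (-4))
      = List.take (PySem.List.clampIdx l.length (-4) - PySem.List.clampIdx l.length a)
          (List.drop (PySem.List.clampIdx l.length a) l) := rfl

lemma pv_k_le (l : List Char) : (l.reverse.takeWhile pvKeep).length ≤ l.length := by
  simpa using (List.takeWhile_sublist (l := l.reverse) pvKeep).length_le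

lemma pv_main (l : List Char) :
    extractExeLoop l 1 []
      = PySem.List.slice l (some (PySem.Chars.rfind l ['\\'] + 1)) (some (-4)) := by
  have hloop := pv_loop_eq l l.length 1 [] (by omega) (by omega)
  simp only [Nat.sub_self, List.drop_zero, List.append_nil] at hloop
  rw [hloop]
  have hkle := pv_k_le l
  rw [PySem.Chars.rfind]
  by_cases hk : (l.reverse.takeWhile pvKeep).length = l.length
  · -- no backslash in l
    rw [pv_go_no l hk l.length (le_refl _)]
    have htw : l.reverse.takeWhile pvKeep = l.reverse :=
      (List.takeWhile_prefix pvKeep).eq_of_length (by simpa using hk)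
    rw [htw, List.drop_reverse, List.reverse_reverse]
    rw [show (-1 : Int) + 1 = ((0 : Nat) : Int) from by norm_num]
    rw [pv_slice_eq l _, pv_clamp_neg4, pv_clamp_nonneg _ 0 (by omega)]
    simp only [List.drop_zero, Nat.sub_zero]
  · -- last backslash at forward index m = n - 1 - k
    have hklt : (l.reverse.takeWhile pvKeep).length < l.length := by omega
    obtain ⟨k, hkdef⟩ : ∃ k, (l.reverse.takeWhile pvKeep).length = k := ⟨_, rfl⟩
    have htw : l.reverse.takeWhile pvKeep = l.reverse.take k := by
      rw [← hkdef]
      exact List.prefix_iff_eq_take.mp (List.takeWhile_prefix pvKeep)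
    have hgo := pv_go_yes l hklt ((l.reverse.takeWhile pvKeep).length + 1) (by omega)
    rw [hkdef] at hgo hklt
    have hn : l.length = (l.length - 1 - k) + (k + 1) := by omega
    rw [hn, hgo]
    rw [htw, List.take_reverse]
    rw [List.drop_reverse, List.reverse_reverse]
    rw [show ((l.length - 1 - k : Nat) : Int) + 1 = ((l.length - 1 - k + 1 : Nat) : Int) from by
      push_cast; ring]
    rw [pv_slice_eq l _, pv_clamp_neg4, pv_clamp_nonneg _ _ (by omega)]
    rw [show l.length - 1 - k + 1 = l.length - k from by omega]
    simp only [List.length_drop]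
    congr 1
    omega

-- ===== VERDICT (by name: the statement is the Claim_ definition above) =====
theorem extract_exe_name_spec : Claim_equal_extract_exe_name := by
  intro s _
  unfold Spec_extract_exe_name extract_exe_name extract_exe_name_alt
  rw [pv_main s.toList]
  simp only [PySem.Str.slice, PySem.Str.rfind, PySem.Chars.slice]
  rw [show "\\".toList = ['\\'] from rfl]
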